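-- pv_equiv track=rewrite | github.com/sudonym-i/Cipher-Space | cryptAlgorithm.py | makeMessageInKeys
-- ===== SOURCE A (Python) =====
-- def makeMessageInKeys (message: list, keys: list, charToKeys: list) -> list:
--     "takes the entire message and the set of keys, and replaces every character with its corresponding keys"
--     i = 0
--     while i < len(keys):
--         b = 0
--         counter = 1
--         while b < len(message):
--             if (message[b] == charToKeys[i]):
--                 message[b] = keys[i];
--                 message[b] = str(counter)
--                 counter +=1
--             b+=1
--         i+=1
--     return message
-- ===== SOURCE B (Python) =====
-- def makeMessageInKeys(message, keys, charToKeys):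
--     "takes the entire message and the set of keys, and replaces every character with its corresponding keys"
--     # Mutates `message` in place, like the original.
--     # Index each value to the positions currently holding it; pop a key's bucket,
--     # number its positions left to right, and keep the index up to date as cells are renamed.
--     pos = {}
--     for j, v in enumerate(message):
--         pos.setdefault(v, []).append(j)
--     for c in charToKeys[:len(keys)]:
--         for counter, j in enumerate(sorted(pos.pop(c, [])), 1):
--             label = str(counter)
--             message[j] = label
--             pos.setdefault(label, []).append(j)
--     return message
-- ===== Notes on version B (the rewrite author's own statement) =====
-- stated objective: faster
-- what changed: A rescans the whole message once per key; B builds a value-to-positions index once, pops each key's bucket, numbers its sorted positions, and keeps the index current as cells are renamed, so untouched entries are never rescanned; Pre_ excludes inputs where A raises IndexError (charToKeys shorter than keys with a nonempty message).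
import Mathlib
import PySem

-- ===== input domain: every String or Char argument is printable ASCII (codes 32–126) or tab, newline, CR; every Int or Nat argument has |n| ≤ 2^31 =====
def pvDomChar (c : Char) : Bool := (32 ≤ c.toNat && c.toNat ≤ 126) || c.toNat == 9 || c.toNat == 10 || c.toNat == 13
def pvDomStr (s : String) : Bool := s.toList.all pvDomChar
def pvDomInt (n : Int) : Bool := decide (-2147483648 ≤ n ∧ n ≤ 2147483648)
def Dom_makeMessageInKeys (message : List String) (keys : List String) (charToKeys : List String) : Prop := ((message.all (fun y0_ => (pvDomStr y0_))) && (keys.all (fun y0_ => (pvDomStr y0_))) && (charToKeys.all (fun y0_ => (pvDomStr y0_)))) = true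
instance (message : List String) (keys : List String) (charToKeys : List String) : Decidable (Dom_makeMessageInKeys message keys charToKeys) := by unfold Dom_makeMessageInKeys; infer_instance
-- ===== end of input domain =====

-- B replaces A's rescan-of-the-whole-message-per-key with a value→positions index built once, popped
-- per key (sorted at use) and kept current as cells are renamed (objective: faster; both A and B
-- mutate `message` in place in Python — the equivalence proved here is about the return value).


-- ===== PORT A =====
-- inner `while b < len(message)` loop; `kv` is keys[i] (written and immediately overwritten, as in A)
def pvInnerA (m : List String) (c kv : String) (b : Nat) (counter : Int) : List String :=
  if h : b < m.length then
    if m[b] = c then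
      pvInnerA ((m.set b kv).set b (PySem.Int.toStr counter)) c kv (b + 1) (counter + 1)
    else
      pvInnerA m c kv (b + 1) counter
  else m
termination_by m.length - b
decreasing_by
  · simp [List.length_set]; omega
  · omega

-- outer `while i < len(keys)` loop; charToKeys[i] raises IndexError when out of range (excluded by Pre_;
-- the `none` branch is only reachable inside Pre_ when message = [], where A returns message untouched)
def pvOuterA (m keys ctk : List String) (i : Nat) : List String :=
  if h : i < keys.length then
    match ctk[i]? with
    | some c => pvOuterA (pvInnerA m c keys[i] 0 1) keys ctk (i + 1)
    | none => m
  else m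
termination_by keys.length - i

def makeMessageInKeys (message : List String) (keys : List String) (charToKeys : List String) : List String :=
  pvOuterA message keys charToKeys 0

-- ===== PORT B =====
-- pos = {}; for j, v in enumerate(message): pos.setdefault(v, []).append(j)
def pvBuild (xs : List String) (j : Nat) (pos : PySem.Dict String (List Nat)) : PySem.Dict String (List Nat) :=
  match xs with
  | [] => pos
  | v :: rest => pvBuild rest (j + 1) (pos.modify v [] (· ++ [j]))

-- for counter, j in enumerate(<sorted bucket>, 1): label = str(counter); message[j] = label;
--   pos.setdefault(label, []).append(j)
def pvAssign (m : List String) (pos : PySem.Dict String (List Nat)) (idxs : List Nat) (counter : Int) :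
    List String × PySem.Dict String (List Nat) :=
  match idxs with
  | [] => (m, pos)
  | j :: rest =>
      pvAssign (m.set j (PySem.Int.toStr counter))
        (pos.modify (PySem.Int.toStr counter) [] (· ++ [j])) rest (counter + 1)

-- for c in charToKeys[:len(keys)]: … sorted(pos.pop(c, [])) …
def pvKeysLoop (m : List String) (pos : PySem.Dict String (List Nat)) (cs : List String) : List String :=
  match cs with
  | [] => m
  | c :: rest =>
      let r := pvAssign m (pos.erase c) (PySem.List.sorted (pos.getD c []) (fun x => x) false) 1
      pvKeysLoop r.1 r.2 rest

def makeMessageInKeys_alt (message : List String) (keys : List String) (charToKeys : List String) : List String :=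
  pvKeysLoop message (pvBuild message 0 PySem.Dict.empty)
    (PySem.List.slice charToKeys none (some (keys.length : Int)))

-- ===== PRECONDITION & SPEC =====
-- Pre_ excludes exactly the inputs where A raises IndexError: charToKeys shorter than keys while
-- message is nonempty (the inner loop then reads charToKeys[i] out of range).
def Pre_makeMessageInKeys (message : List String) (keys : List String) (charToKeys : List String) : Prop :=
  keys.length ≤ charToKeys.length ∨ message = []
instance (message : List String) (keys : List String) (charToKeys : List String) : Decidable (Pre_makeMessageInKeys message keys charToKeys) := by unfold Pre_makeMessageInKeys; infer_instance

def pvWitness_makeMessageInKeys : List String × List String × List String :=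
  (["a", "b", "a"], ["x"], ["a"])

def Spec_makeMessageInKeys (message : List String) (keys : List String) (charToKeys : List String) (out : List String) : Prop := out = makeMessageInKeys_alt message keys charToKeys
instance (message : List String) (keys : List String) (charToKeys : List String) (out : List String) : Decidable (Spec_makeMessageInKeys message keys charToKeys out) := by unfold Spec_makeMessageInKeys; infer_instance

-- ===== CLAIM (what is proved, stated in full; the proofs are below) =====
def Claim_equal_makeMessageInKeys : Prop := ∀ (message : List String) (keys : List String) (charToKeys : List String), Dom_makeMessageInKeys message keys charToKeys → Pre_makeMessageInKeys message keys charToKeys → Spec_makeMessageInKeys message keys charToKeys (makeMessageInKeys message keys charToKeys)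


-- ===== LEMMAS AND PROOFS =====

-- `pvIdxs xs c j` = the (increasing) positions of c in xs, offset by j — the canonical match set.
def pvIdxs (xs : List String) (c : String) (j : Nat) : List Nat :=
  match xs with
  | [] => []
  | x :: rest => (if x = c then [j] else []) ++ pvIdxs rest c (j + 1)

-- replace positions idxs (in order) by str(counter), str(counter+1), …
def pvSetAll (m : List String) (idxs : List Nat) (counter : Int) : List String :=
  match idxs with
  | [] => m
  | j :: rest => pvSetAll (m.set j (PySem.Int.toStr counter)) rest (counter + 1)

-- the common specification both loops compute
def pvSpecLoop (m : List String) (cs : List String) : List String :=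
  cs.foldl (fun m c => pvSetAll m (pvIdxs m c 0) 1) m

theorem pvMem_pvIdxs (xs : List String) (c : String) : ∀ (j i : Nat),
    i ∈ pvIdxs xs c j ↔ j ≤ i ∧ xs[i - j]? = some c := by
  induction xs with
  | nil => intro j i; simp [pvIdxs]
  | cons x rest ih =>
    intro j i
    simp only [pvIdxs, List.mem_append, ih (j+1) i]
    by_cases hij : i = j
    · subst hij
      simp
    · by_cases hle : j + 1 ≤ i
      · have h1 : ¬ (i ∈ if x = c then [j] else []) := by split <;> simp; omega
        have h2 : i - j = (i - (j+1)) + 1 := by omega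
        simp only [h1, false_or]
        rw [h2]
        simp
        omega
      · have h1 : ¬ (i ∈ if x = c then [j] else []) := by split <;> simp; omega
        simp only [h1, false_or]
        constructor
        · rintro ⟨h, _⟩; omega
        · rintro ⟨h, _⟩; omega

theorem pvPairwise_pvIdxs (xs : List String) (c : String) : ∀ (j : Nat),
    (pvIdxs xs c j).Pairwise (· < ·) := by
  induction xs with
  | nil => intro j; simp [pvIdxs]
  | cons x rest ih =>
    intro j
    simp only [pvIdxs]
    split
    · simp only [List.singleton_append, List.pairwise_cons]
      refine ⟨?_, ih (j+1)⟩
      intro i hi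
      have := (pvMem_pvIdxs rest c (j+1) i).mp hi
      omega
    · simpa using ih (j+1)

theorem pvInnerA_spec (c kv : String) : ∀ n b m counter, m.length - b ≤ n →
    pvInnerA m c kv b counter = pvSetAll m (pvIdxs (m.drop b) c b) counter := by
  intro n
  induction n with
  | zero =>
    intro b m counter h
    have hb : ¬ b < m.length := by omega
    rw [pvInnerA]
    simp only [hb, dite_false]
    rw [List.drop_eq_nil_of_le (by omega)]
    rfl
  | succ n ih =>
    intro b m counter h
    by_cases hb : b < m.length
    · rw [List.drop_eq_getElem_cons hb]
      rw [pvInnerA]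
      simp only [hb, dite_true]
      by_cases hc : m[b] = c
      · simp only [hc, if_true]
        rw [pvIdxs]
        rw [if_pos rfl, List.singleton_append]
        rw [List.set_set]
        rw [ih (b+1) (m.set b (PySem.Int.toStr counter)) (counter+1) (by simp; omega)]
        rw [List.drop_set_of_lt (by omega)]
        rfl
      · simp only [hc, if_false]
        rw [pvIdxs]
        simp only [if_neg hc, List.nil_append]
        exact ih (b+1) m counter (by omega)
    · rw [pvInnerA]
      simp only [hb, dite_false]
      rw [List.drop_eq_nil_of_le (by omega)]
      rfl

theorem pvOuterA_spec (keys ctk : List String) (h : keys.length ≤ ctk.length) :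
    ∀ n i m, keys.length - i ≤ n →
    pvOuterA m keys ctk i = pvSpecLoop m ((ctk.take keys.length).drop i) := by
  intro n
  induction n with
  | zero =>
    intro i m hn
    have hi : ¬ i < keys.length := by omega
    rw [pvOuterA]
    simp only [hi, dite_false]
    rw [List.drop_eq_nil_of_le (by simp; omega)]
    rfl
  | succ n ih =>
    intro i m hn
    by_cases hi : i < keys.length
    · have hic : i < ctk.length := by omega
      rw [pvOuterA]
      simp only [hi, dite_true]
      rw [List.getElem?_eq_getElem hic]
      show pvOuterA (pvInnerA m ctk[i] keys[i] 0 1) keys ctk (i + 1) = _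
      have hlt : i < (ctk.take keys.length).length := by simp; omega
      rw [List.drop_eq_getElem_cons hlt]
      rw [List.getElem_take]
      have : pvSpecLoop m (ctk[i] :: (ctk.take keys.length).drop (i+1))
           = pvSpecLoop (pvSetAll m (pvIdxs m ctk[i] 0) 1) ((ctk.take keys.length).drop (i+1)) := rfl
      rw [this]
      rw [← ih (i+1) _ (by omega)]
      rw [pvInnerA_spec ctk[i] keys[i] m.length 0 m 1 (by omega), List.drop_zero]
    · rw [pvOuterA]
      simp only [hi, dite_false]
      rw [List.drop_eq_nil_of_le (by simp; omega)]
      rfl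

theorem pvOuterA_nil (keys ctk : List String) : ∀ n i, keys.length - i ≤ n →
    pvOuterA [] keys ctk i = [] := by
  intro n
  induction n with
  | zero =>
    intro i hn
    rw [pvOuterA]
    simp only [show ¬ i < keys.length by omega, dite_false]
  | succ n ih =>
    intro i hn
    by_cases hi : i < keys.length
    · rw [pvOuterA]
      simp only [hi, dite_true]
      cases hctk : ctk[i]? with
      | none => rfl
      | some c =>
        show pvOuterA (pvInnerA [] c keys[i] 0 1) keys ctk (i + 1) = []
        have hinner : pvInnerA [] c keys[i] 0 1 = [] := by rw [pvInnerA]; simp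
        rw [hinner]
        exact ih (i+1) (by omega)
    · rw [pvOuterA]
      simp only [hi, dite_false]

theorem pvFind (k k' : String) : ∀ (items : List (String × List Nat)),
    (items.filter (fun p => !(p.1 == k))).find? (fun p => p.1 == k') = (if k' = k then none else items.find? (fun p => p.1 == k')) := by
  intro items
  induction items with
  | nil => simp
  | cons p t ih =>
    rw [List.filter_cons]
    by_cases h1 : p.1 = k
    · simp only [h1, beq_self_eq_true, Bool.not_true, Bool.false_eq_true, if_false, ih]
      by_cases h2 : k' = k
      · simp [h2]
      · simp only [if_neg h2]
        rw [List.find?_cons_of_neg (by simp; exact fun hh => h2 (by rw [← hh, h1]))]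
    · have hcond : (!(p.1 == k)) = true := by simp [h1]
      rw [if_pos hcond]
      by_cases h3 : p.1 = k'
      · rw [List.find?_cons_of_pos (by simp [h3]), List.find?_cons_of_pos (by simp [h3])]
        have hne : ¬ k' = k := fun hh => h1 (h3.trans hh)
        simp [hne]
      · rw [List.find?_cons_of_neg (by simp [h3]), ih]
        by_cases h2 : k' = k
        · simp [h2]
        · simp only [if_neg h2]
          rw [List.find?_cons_of_neg (by simp [h3])]

theorem pvGetD_erase (d : PySem.Dict String (List Nat)) (k k' : String) :
    (d.erase k).getD k' [] = if k' = k then [] else d.getD k' [] := by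
  simp only [PySem.Dict.getD, PySem.Dict.get?, PySem.Dict.erase]
  rw [pvFind]
  split <;> simp

theorem pvBuild_getD (v : String) : ∀ (xs : List String) (j : Nat) (pos : PySem.Dict String (List Nat)),
    (pvBuild xs j pos).getD v [] = pos.getD v [] ++ pvIdxs xs v j := by
  intro xs
  induction xs with
  | nil => intro j pos; simp [pvBuild, pvIdxs]
  | cons x rest ih =>
    intro j pos
    simp only [pvBuild, pvIdxs]
    rw [ih (j+1)]
    rw [PySem.Dict.getD_modify]
    by_cases h : v = x
    · subst h; simp
    · have h2 : ¬ x = v := fun hh => h hh.symm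
      simp [h, h2]

theorem pvAssign_spec : ∀ (idxs : List Nat) (m : List String) (pos : PySem.Dict String (List Nat)) (t : Int),
    idxs.Nodup →
    (∀ j ∈ idxs, j < m.length) →
    (∀ v i, i ∈ pos.getD v [] ↔ (m[i]? = some v ∧ i ∉ idxs)) →
    (∀ v, (pos.getD v []).Nodup) →
    (pvAssign m pos idxs t).1 = pvSetAll m idxs t ∧
    (∀ v i, i ∈ (pvAssign m pos idxs t).2.getD v [] ↔ (pvSetAll m idxs t)[i]? = some v) ∧
    (∀ v, ((pvAssign m pos idxs t).2.getD v []).Nodup) := by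
  intro idxs
  induction idxs with
  | nil =>
    intro m pos t _ _ hmem hnd
    refine ⟨rfl, ?_, hnd⟩
    intro v i
    simpa using hmem v i
  | cons j rest ih =>
    intro m pos t hnd hlen hmem hndb
    rw [List.nodup_cons] at hnd
    have hjm : j < m.length := hlen j (List.mem_cons_self ..)
    have hjrest : j ∉ rest := hnd.1
    set v₀ := PySem.Int.toStr t with hv₀
    set m' := m.set j v₀ with hm'
    set pos' := pos.modify v₀ [] (· ++ [j]) with hpos'
    have hbucket : ∀ v, pos'.getD v [] = if v = v₀ then pos.getD v₀ [] ++ [j] else pos.getD v [] := by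
      intro v; exact PySem.Dict.getD_modify pos v₀ v [] _
    have hj_notin : j ∉ pos.getD v₀ [] := by
      intro hh
      have := (hmem v₀ j).mp hh
      exact this.2 (List.mem_cons_self ..)
    have hmem' : ∀ v i, i ∈ pos'.getD v [] ↔ (m'[i]? = some v ∧ i ∉ rest) := by
      intro v i
      rw [hbucket]
      by_cases hv : v = v₀
      · subst hv
        rw [if_pos rfl]
        simp only [List.mem_append, List.mem_singleton]
        by_cases hij : i = j
        · subst hij
          simp only [or_true, true_iff]
          refine ⟨?_, hjrest⟩
          rw [hm', List.getElem?_set_self hjm]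
        · rw [hmem]
          have h1 : m'[i]? = m[i]? := List.getElem?_set_ne (fun hh => hij hh.symm)
          rw [h1]
          simp [hij]
      · rw [if_neg hv, hmem]
        by_cases hij : i = j
        · subst hij
          simp only [List.mem_cons, true_or, not_true_eq_false, and_false, false_iff, not_and, not_not]
          intro hm
          rw [hm', List.getElem?_set_self hjm] at hm
          exact absurd (Option.some.inj hm).symm hv
        · have h1 : m'[i]? = m[i]? := List.getElem?_set_ne (fun hh => hij hh.symm)
          rw [h1]
          simp [hij]
    have hndb' : ∀ v, (pos'.getD v []).Nodup := by
      intro v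
      rw [hbucket]
      split
      · exact List.Nodup.append (hndb v₀) (List.nodup_singleton j) (by simpa using hj_notin)
      · exact hndb v
    have hlen' : ∀ j' ∈ rest, j' < m'.length := by
      intro j' hj'
      rw [hm', List.length_set]
      exact hlen j' (List.mem_cons_of_mem _ hj')
    exact ih m' pos' (t + 1) hnd.2 hlen' hmem' hndb'

theorem pvKeysLoop_spec : ∀ (cs : List String) (m : List String) (pos : PySem.Dict String (List Nat)),
    (∀ v i, i ∈ pos.getD v [] ↔ m[i]? = some v) →
    (∀ v, (pos.getD v []).Nodup) →
    pvKeysLoop m pos cs = pvSpecLoop m cs := by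
  intro cs
  induction cs with
  | nil => intro m pos _ _; rfl
  | cons c rest ih =>
    intro m pos hmem hnd
    have hperm : (pvIdxs m c 0).Perm (pos.getD c []) := by
      apply (List.perm_ext_iff_of_nodup (pvPairwise_pvIdxs m c 0).nodup (hnd c)).mpr
      intro i
      rw [hmem, pvMem_pvIdxs]
      simp
    have hidxs : PySem.List.sorted (pos.getD c []) (fun x => x) false = pvIdxs m c 0 :=
      PySem.List.sorted_eq_of_perm_of_pairwise_lt _ _ _ hperm (pvPairwise_pvIdxs m c 0)
    have hlen : ∀ j ∈ pvIdxs m c 0, j < m.length := by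
      intro j hj
      have := (pvMem_pvIdxs m c 0 j).mp hj
      simp only [Nat.sub_zero] at this
      rw [List.getElem?_eq_some_iff] at this
      exact this.2.1
    have hmem' : ∀ v i, i ∈ (pos.erase c).getD v [] ↔ (m[i]? = some v ∧ i ∉ pvIdxs m c 0) := by
      intro v i
      rw [pvGetD_erase]
      by_cases hv : v = c
      · subst hv
        simp only [if_true, List.not_mem_nil, false_iff, not_and, not_not]
        intro hm
        rw [pvMem_pvIdxs]
        simpa using hm
      · rw [if_neg hv, hmem]
        constructor
        · intro hm
          refine ⟨hm, fun hin => ?_⟩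
          have := (pvMem_pvIdxs m c 0 i).mp hin
          simp only [Nat.sub_zero] at this
          rw [hm] at this
          exact hv (Option.some.inj this.2)
        · exact fun h => h.1
    have hnd' : ∀ v, ((pos.erase c).getD v []).Nodup := by
      intro v
      rw [pvGetD_erase]
      split
      · exact List.nodup_nil
      · exact hnd v
    obtain ⟨h1, h2, h3⟩ := pvAssign_spec (pvIdxs m c 0) m (pos.erase c) 1
      (pvPairwise_pvIdxs m c 0).nodup hlen hmem' hnd'
    show pvKeysLoop (pvAssign m (pos.erase c) (PySem.List.sorted (pos.getD c []) (fun x => x) false) 1).1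
        (pvAssign m (pos.erase c) (PySem.List.sorted (pos.getD c []) (fun x => x) false) 1).2 rest
      = pvSpecLoop m (c :: rest)
    have hstep : pvSpecLoop m (c :: rest) = pvSpecLoop (pvSetAll m (pvIdxs m c 0) 1) rest := rfl
    rw [hidxs, h1, hstep]
    exact ih _ _ h2 h3

theorem pvAssign_nil_fst : ∀ (idxs : List Nat) (pos : PySem.Dict String (List Nat)) (t : Int),
    (pvAssign [] pos idxs t).1 = [] := by
  intro idxs
  induction idxs with
  | nil => intro pos t; rfl
  | cons j rest ih =>
    intro pos t
    show (pvAssign (List.set [] j _) _ rest (t+1)).1 = []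
    rw [List.set_nil]
    exact ih _ _

theorem pvKeysLoop_nil : ∀ (cs : List String) (pos : PySem.Dict String (List Nat)),
    pvKeysLoop [] pos cs = [] := by
  intro cs
  induction cs with
  | nil => intro pos; rfl
  | cons c rest ih =>
    intro pos
    show pvKeysLoop (pvAssign [] (pos.erase c) _ 1).1 (pvAssign [] (pos.erase c) _ 1).2 rest = []
    rw [pvAssign_nil_fst]
    exact ih _

-- ===== VERDICT (by name: the statement is the Claim_ definition above) =====
theorem makeMessageInKeys_spec : Claim_equal_makeMessageInKeys := by
  intro message keys charToKeys _ hpre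
  unfold Spec_makeMessageInKeys makeMessageInKeys makeMessageInKeys_alt
  rw [PySem.List.slice_to_natCast]
  rcases hpre with hle | hnil
  · rw [pvOuterA_spec keys charToKeys hle _ 0 message le_rfl, List.drop_zero]
    rw [pvKeysLoop_spec (charToKeys.take keys.length) message _ ?_ ?_]
    · intro v i
      rw [pvBuild_getD v message 0 PySem.Dict.empty]
      simp only [PySem.Dict.getD_empty, List.nil_append]
      rw [pvMem_pvIdxs]
      simp
    · intro v
      rw [pvBuild_getD v message 0 PySem.Dict.empty]
      simp only [PySem.Dict.getD_empty, List.nil_append]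
      exact (pvPairwise_pvIdxs message v 0).nodup
  · subst hnil
    rw [pvOuterA_nil keys charToKeys _ 0 le_rfl, pvKeysLoop_nil]
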